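-- pv_equiv track=rewrite | github.com/wilmurillo-ai/Design-Assistant | .skills/openclaw-skills/skills/sgillen/sf-civic-digest/scripts/sf_sfusd_board.py | _classify_meeting_type
-- ===== SOURCE A (Python) =====
-- def _classify_meeting_type(raw_type):
--     """Normalize meeting type string to a canonical form."""
--     t = raw_type.strip().lower()
--     if "regular" in t or "board meeting" in t:
--         return "regular"
--     if "special" in t:
--         return "special"
--     if "committee" in t:
--         return "committee"
--     if "workshop" in t:
--         return "workshop"
--     if "retreat" in t:
--         return "retreat"
--     if "cancel" in t:
--         return "cancelled"
--     # Default: if it looks like a committee name, mark as committee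
--     if any(w in t for w in ("curriculum", "budget", "ad hoc", "rules", "audit")):
--         return "committee"
--     return "regular"
-- ===== SOURCE B (Python) =====
-- _PRIORITY = {
--     "regular": 0, "board meeting": 0,
--     "special": 1,
--     "committee": 2,
--     "workshop": 3,
--     "retreat": 4,
--     "cancel": 5,
--     "curriculum": 6, "budget": 6, "ad hoc": 6, "rules": 6, "audit": 6,
-- }
-- _LABELS = ["regular", "special", "committee", "workshop", "retreat", "cancelled", "committee"]
--
-- def _classify_meeting_type(raw_type):
--     """Normalize meeting type string: arg-min over the priorities of all matched keywords."""
--     t = raw_type.strip().lower()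
--     hits = [p for w, p in _PRIORITY.items() if w in t]
--     return _LABELS[min(hits)] if hits else "regular"
-- ===== Notes on version B (the rewrite author's own statement) =====
-- stated objective: alternative
-- what changed: Replaces A's first-match if/return cascade with an arg-min formulation: a keyword-to-priority dict is filtered once to the priorities of all keywords occurring in the normalized string, and the minimum priority indexes a label table (default when no keyword matches); correct because A returns the label of the lowest-priority matching rule.
import Mathlib
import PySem

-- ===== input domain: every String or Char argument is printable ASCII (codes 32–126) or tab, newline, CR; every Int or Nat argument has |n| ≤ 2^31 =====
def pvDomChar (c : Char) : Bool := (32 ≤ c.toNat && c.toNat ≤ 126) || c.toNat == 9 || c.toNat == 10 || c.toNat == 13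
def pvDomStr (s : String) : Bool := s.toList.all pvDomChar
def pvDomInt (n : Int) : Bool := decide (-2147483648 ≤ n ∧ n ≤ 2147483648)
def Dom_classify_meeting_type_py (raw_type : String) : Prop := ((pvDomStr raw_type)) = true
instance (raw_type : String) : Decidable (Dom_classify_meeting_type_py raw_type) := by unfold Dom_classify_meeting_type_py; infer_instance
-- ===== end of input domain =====

-- B replaces A's first-match if/return cascade by an arg-min: a keyword→priority table is filtered to the priorities of matched keywords, the minimum priority is indexed into a label table; objective: alternative (same cost, different algorithm).


-- ===== PORT A =====
def classify_meeting_type_py (raw_type : String) : String :=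
  let t := PySem.Str.lower (PySem.Str.strip raw_type)
  if PySem.Str.isIn "regular" t || PySem.Str.isIn "board meeting" t then "regular"
  else if PySem.Str.isIn "special" t then "special"
  else if PySem.Str.isIn "committee" t then "committee"
  else if PySem.Str.isIn "workshop" t then "workshop"
  else if PySem.Str.isIn "retreat" t then "retreat"
  else if PySem.Str.isIn "cancel" t then "cancelled"
  else if ["curriculum", "budget", "ad hoc", "rules", "audit"].any (fun w => PySem.Str.isIn w t) then "committee"
  else "regular"

-- ===== PORT B =====
def pvPriority : List (String × Int) :=
  [ ("regular", 0), ("board meeting", 0),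
    ("special", 1),
    ("committee", 2),
    ("workshop", 3),
    ("retreat", 4),
    ("cancel", 5),
    ("curriculum", 6), ("budget", 6), ("ad hoc", 6), ("rules", 6), ("audit", 6) ]

def pvLabels : List String :=
  ["regular", "special", "committee", "workshop", "retreat", "cancelled", "committee"]

def classify_meeting_type_py_alt (raw_type : String) : String :=
  let t := PySem.Str.lower (PySem.Str.strip raw_type)
  let hits := (pvPriority.filter (fun kp => PySem.Str.isIn kp.1 t)).map (fun kp => kp.2)
  match PySem.List.min? hits (fun p => p) with
  | none => "regular"                                   -- 'if hits else "regular"'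
  | some m => (PySem.List.pyGet? pvLabels m).getD "regular"
      -- _LABELS[min(hits)]: min(hits) ∈ {0,…,6} is always a valid index, so the
      -- IndexError (none) branch of pyGet? is unreachable; getD's default is never used.

-- ===== PRECONDITION & SPEC =====
def Spec_classify_meeting_type_py (raw_type : String) (out : String) : Prop := out = classify_meeting_type_py_alt raw_type
instance (raw_type : String) (out : String) : Decidable (Spec_classify_meeting_type_py raw_type out) := by unfold Spec_classify_meeting_type_py; infer_instance

-- ===== CLAIM (what is proved, stated in full; the proofs are below) =====
def Claim_equal_classify_meeting_type_py : Prop := ∀ (raw_type : String), Dom_classify_meeting_type_py raw_type → Spec_classify_meeting_type_py raw_type (classify_meeting_type_py raw_type)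

-- ===== LEMMAS AND PROOFS =====
-- all priorities in the tail of the table are ≥ the matched one, so the fold keeps the head
lemma pvFoldlMinEq : ∀ (l : List Int) (x : Int), (∀ y ∈ l, x ≤ y) → l.foldl min x = x
  | [], _, _ => rfl
  | a :: l, x, h => by
      simp only [List.foldl_cons]
      rw [min_eq_left (h a List.mem_cons_self)]
      exact pvFoldlMinEq l x fun y hy => h y (List.mem_cons_of_mem _ hy)

-- min over a cons whose tail is drawn (by filtering) from a table of priorities ≥ x is x
lemma pvMinFilter (t : String) (x : Int) (l : List (String × Int)) (h : ∀ kp ∈ l, x ≤ kp.2) :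
    PySem.List.min? (x :: (l.filter (fun kp => PySem.Str.isIn kp.1 t)).map (fun kp => kp.2)) (fun p => p) = some x := by
  rw [PySem.List.min?_id_cons]
  refine congrArg some (pvFoldlMinEq _ _ ?_)
  intro y hy
  simp only [List.mem_map, List.mem_filter] at hy
  obtain ⟨kp, ⟨hmem, _⟩, rfl⟩ := hy
  exact h kp hmem

-- one filter step over the keyword table, condition known
lemma pvStepNeg (t w : String) (p : Int) (l : List (String × Int)) (h : PySem.Str.isIn w t = false) :
    ((w, p) :: l).filter (fun kp => PySem.Str.isIn kp.1 t) = l.filter (fun kp => PySem.Str.isIn kp.1 t) := by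
  simp only [List.filter_cons, h]
  simp

lemma pvStepPos (t w : String) (p : Int) (l : List (String × Int)) (h : PySem.Str.isIn w t = true) :
    ((w, p) :: l).filter (fun kp => PySem.Str.isIn kp.1 t) = (w, p) :: l.filter (fun kp => PySem.Str.isIn kp.1 t) := by
  simp only [List.filter_cons, h]
  simp

-- ===== VERDICT (by name: the statement is the Claim_ definition above) =====
theorem classify_meeting_type_py_spec : Claim_equal_classify_meeting_type_py := by
  intro raw_type _
  unfold Spec_classify_meeting_type_py classify_meeting_type_py classify_meeting_type_py_alt pvPriority pvLabels
  dsimp only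
  generalize PySem.Str.lower (PySem.Str.strip raw_type) = t
  cases h0 : PySem.Str.isIn "regular" t with
  | true =>
      rw [pvStepPos _ _ _ _ h0]
      simp only [List.map_cons]
      rw [pvMinFilter _ _ _ (by decide)]
      simp_all [PySem.List.pyGet?, PySem.List.pyIdx?]
  | false =>
      cases h1 : PySem.Str.isIn "board meeting" t with
      | true =>
          rw [pvStepNeg _ _ _ _ h0, pvStepPos _ _ _ _ h1]
          simp only [List.map_cons]
          rw [pvMinFilter _ _ _ (by decide)]
          simp_all [PySem.List.pyGet?, PySem.List.pyIdx?]
      | false =>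
          cases h2 : PySem.Str.isIn "special" t with
          | true =>
              rw [pvStepNeg _ _ _ _ h0, pvStepNeg _ _ _ _ h1, pvStepPos _ _ _ _ h2]
              simp only [List.map_cons]
              rw [pvMinFilter _ _ _ (by decide)]
              simp_all [PySem.List.pyGet?, PySem.List.pyIdx?]
          | false =>
              cases h3 : PySem.Str.isIn "committee" t with
              | true =>
                  rw [pvStepNeg _ _ _ _ h0, pvStepNeg _ _ _ _ h1, pvStepNeg _ _ _ _ h2, pvStepPos _ _ _ _ h3]
                  simp only [List.map_cons]
                  rw [pvMinFilter _ _ _ (by decide)]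
                  simp_all [PySem.List.pyGet?, PySem.List.pyIdx?]
              | false =>
                  cases h4 : PySem.Str.isIn "workshop" t with
                  | true =>
                      rw [pvStepNeg _ _ _ _ h0, pvStepNeg _ _ _ _ h1, pvStepNeg _ _ _ _ h2, pvStepNeg _ _ _ _ h3, pvStepPos _ _ _ _ h4]
                      simp only [List.map_cons]
                      rw [pvMinFilter _ _ _ (by decide)]
                      simp_all [PySem.List.pyGet?, PySem.List.pyIdx?]
                  | false =>
                      cases h5 : PySem.Str.isIn "retreat" t with
                      | true =>
                          rw [pvStepNeg _ _ _ _ h0, pvStepNeg _ _ _ _ h1, pvStepNeg _ _ _ _ h2, pvStepNeg _ _ _ _ h3, pvStepNeg _ _ _ _ h4, pvStepPos _ _ _ _ h5]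
                          simp only [List.map_cons]
                          rw [pvMinFilter _ _ _ (by decide)]
                          simp_all [PySem.List.pyGet?, PySem.List.pyIdx?]
                      | false =>
                          cases h6 : PySem.Str.isIn "cancel" t with
                          | true =>
                              rw [pvStepNeg _ _ _ _ h0, pvStepNeg _ _ _ _ h1, pvStepNeg _ _ _ _ h2, pvStepNeg _ _ _ _ h3, pvStepNeg _ _ _ _ h4, pvStepNeg _ _ _ _ h5, pvStepPos _ _ _ _ h6]
                              simp only [List.map_cons]
                              rw [pvMinFilter _ _ _ (by decide)]
                              simp_all [PySem.List.pyGet?, PySem.List.pyIdx?]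
                          | false =>
                              cases h7 : PySem.Str.isIn "curriculum" t with
                              | true =>
                                  rw [pvStepNeg _ _ _ _ h0, pvStepNeg _ _ _ _ h1, pvStepNeg _ _ _ _ h2, pvStepNeg _ _ _ _ h3, pvStepNeg _ _ _ _ h4, pvStepNeg _ _ _ _ h5, pvStepNeg _ _ _ _ h6, pvStepPos _ _ _ _ h7]
                                  simp only [List.map_cons]
                                  rw [pvMinFilter _ _ _ (by decide)]
                                  simp_all [PySem.List.pyGet?, PySem.List.pyIdx?]
                              | false =>
                                  cases h8 : PySem.Str.isIn "budget" t with
                                  | true =>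
                                      rw [pvStepNeg _ _ _ _ h0, pvStepNeg _ _ _ _ h1, pvStepNeg _ _ _ _ h2, pvStepNeg _ _ _ _ h3, pvStepNeg _ _ _ _ h4, pvStepNeg _ _ _ _ h5, pvStepNeg _ _ _ _ h6, pvStepNeg _ _ _ _ h7, pvStepPos _ _ _ _ h8]
                                      simp only [List.map_cons]
                                      rw [pvMinFilter _ _ _ (by decide)]
                                      simp_all [PySem.List.pyGet?, PySem.List.pyIdx?]
                                  | false =>
                                      cases h9 : PySem.Str.isIn "ad hoc" t with
                                      | true =>
                                          rw [pvStepNeg _ _ _ _ h0, pvStepNeg _ _ _ _ h1, pvStepNeg _ _ _ _ h2, pvStepNeg _ _ _ _ h3, pvStepNeg _ _ _ _ h4, pvStepNeg _ _ _ _ h5, pvStepNeg _ _ _ _ h6, pvStepNeg _ _ _ _ h7, pvStepNeg _ _ _ _ h8, pvStepPos _ _ _ _ h9]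
                                          simp only [List.map_cons]
                                          rw [pvMinFilter _ _ _ (by decide)]
                                          simp_all [PySem.List.pyGet?, PySem.List.pyIdx?]
                                      | false =>
                                          cases h10 : PySem.Str.isIn "rules" t with
                                          | true =>
                                              rw [pvStepNeg _ _ _ _ h0, pvStepNeg _ _ _ _ h1, pvStepNeg _ _ _ _ h2, pvStepNeg _ _ _ _ h3, pvStepNeg _ _ _ _ h4, pvStepNeg _ _ _ _ h5, pvStepNeg _ _ _ _ h6, pvStepNeg _ _ _ _ h7, pvStepNeg _ _ _ _ h8, pvStepNeg _ _ _ _ h9, pvStepPos _ _ _ _ h10]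
                                              simp only [List.map_cons]
                                              rw [pvMinFilter _ _ _ (by decide)]
                                              simp_all [PySem.List.pyGet?, PySem.List.pyIdx?]
                                          | false =>
                                              cases h11 : PySem.Str.isIn "audit" t with
                                              | true =>
                                                  rw [pvStepNeg _ _ _ _ h0, pvStepNeg _ _ _ _ h1, pvStepNeg _ _ _ _ h2, pvStepNeg _ _ _ _ h3, pvStepNeg _ _ _ _ h4, pvStepNeg _ _ _ _ h5, pvStepNeg _ _ _ _ h6, pvStepNeg _ _ _ _ h7, pvStepNeg _ _ _ _ h8, pvStepNeg _ _ _ _ h9, pvStepNeg _ _ _ _ h10, pvStepPos _ _ _ _ h11]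
                                                  simp only [List.map_cons]
                                                  rw [pvMinFilter _ _ _ (by decide)]
                                                  simp_all [PySem.List.pyGet?, PySem.List.pyIdx?]
                                              | false =>
                                                  rw [pvStepNeg _ _ _ _ h0, pvStepNeg _ _ _ _ h1, pvStepNeg _ _ _ _ h2, pvStepNeg _ _ _ _ h3, pvStepNeg _ _ _ _ h4, pvStepNeg _ _ _ _ h5, pvStepNeg _ _ _ _ h6, pvStepNeg _ _ _ _ h7, pvStepNeg _ _ _ _ h8, pvStepNeg _ _ _ _ h9, pvStepNeg _ _ _ _ h10, pvStepNeg _ _ _ _ h11]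
                                                  simp_all [PySem.List.min?]
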